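-- pv_equiv track=rewrite | github.com/DevAudioVisual/AluraVideos | Models/CriarProjeto/DropDownloader.py | quebrar_texto
-- ===== SOURCE A (Python) =====
-- def quebrar_texto(texto, limite):
--     resultado = ""
--     contador = 0
--
--     for i, caractere in enumerate(texto):
--         resultado += caractere
--         contador += 1
--
--         # Quando o limite é atingido
--         if contador == limite:
--             resultado += "<br>"   # Quebra normal
--             contador = 0  # Reinicia o contador para a próxima linha
--
--     return resultado
-- ===== SOURCE B (Python) =====
-- def quebrar_texto(texto, limite):
--     if limite <= 0:
--         return texto
--     num_full = len(texto) // limite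
--     return ''.join(texto[i*limite:(i+1)*limite] + '<br>' for i in range(num_full)) + texto[num_full*limite:]
-- ===== Notes on version B (the rewrite author's own statement) =====
-- stated objective: faster
-- what changed: Replaces the char-by-char accumulation with a counter by slicing the text into fixed-size blocks and joining them with '<br>' (guarding limite <= 0, where A emits no breaks).
import Mathlib
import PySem

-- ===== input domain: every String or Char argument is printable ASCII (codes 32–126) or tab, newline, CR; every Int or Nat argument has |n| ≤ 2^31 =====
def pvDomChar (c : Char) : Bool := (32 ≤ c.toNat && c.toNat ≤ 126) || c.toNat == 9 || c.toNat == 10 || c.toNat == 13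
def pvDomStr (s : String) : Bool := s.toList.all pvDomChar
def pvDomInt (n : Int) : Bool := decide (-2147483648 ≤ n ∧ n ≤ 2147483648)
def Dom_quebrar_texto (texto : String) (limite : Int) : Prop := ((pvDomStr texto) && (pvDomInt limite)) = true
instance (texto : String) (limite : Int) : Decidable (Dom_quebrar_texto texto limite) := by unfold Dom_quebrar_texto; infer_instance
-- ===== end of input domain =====

-- B replaces A's char-by-char accumulation with a counter by slicing the text into fixed
-- blocks of `limite` chars joined with "<br>" (guarding limite <= 0, where A emits no breaks).


-- ===== PORT A =====
def quebrar_texto (texto : String) (limite : Int) : String :=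
  let st := texto.toList.foldl
    (fun (st : List Char × Int) caractere =>
      let resultado := st.1 ++ [caractere]
      let contador := st.2 + 1
      if contador = limite then (resultado ++ ('<' :: 'b' :: 'r' :: '>' :: []), 0)
      else (resultado, contador))
    ([], 0)
  String.ofList st.1

-- ===== PORT B =====
def quebrar_texto_alt (texto : String) (limite : Int) : String :=
  if limite ≤ 0 then texto
  else
    let cs := texto.toList
    let numFull := PySem.Int.floordiv (cs.length : Int) limite
    String.ofList
      ((((PySem.List.pyRange 0 numFull 1).map (fun i =>
          PySem.List.slice cs (some (i * limite)) (some ((i + 1) * limite))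
            ++ ('<' :: 'b' :: 'r' :: '>' :: []))).flatten)
        ++ PySem.List.slice cs (some (numFull * limite)) none)

-- ===== PRECONDITION & SPEC =====
def Spec_quebrar_texto (texto : String) (limite : Int) (out : String) : Prop := out = quebrar_texto_alt texto limite
instance (texto : String) (limite : Int) (out : String) : Decidable (Spec_quebrar_texto texto limite out) := by unfold Spec_quebrar_texto; infer_instance

-- ===== CLAIM (what is proved, stated in full; the proofs are below) =====
def Claim_equal_quebrar_texto : Prop := ∀ (texto : String) (limite : Int), Dom_quebrar_texto texto limite → Spec_quebrar_texto texto limite (quebrar_texto texto limite)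

-- ===== LEMMAS AND PROOFS =====

-- A's loop body, abbreviated for the lemmas
def pvStepA (L : Int) (st : List Char × Int) (c : Char) : List Char × Int :=
  let r := st.1 ++ [c]
  let k := st.2 + 1
  if k = L then (r ++ ('<' :: 'b' :: 'r' :: '>' :: []), 0) else (r, k)

-- the common "blocks of Ln chars, each followed by <br>" shape both programs compute
def pvChunks (Ln : Nat) (cs : List Char) : List Char :=
  if h : Ln = 0 ∨ cs.length < Ln then cs
  else cs.take Ln ++ ('<' :: 'b' :: 'r' :: '>' :: []) ++ pvChunks Ln (cs.drop Ln)
termination_by cs.length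
decreasing_by simp; omega

-- A's loop appends the chars unchanged while the counter cannot reach L
lemma pvA_noBreak (L : Int) : ∀ (cs acc : List Char) (c : Int), 0 ≤ c →
    (c + cs.length < L ∨ L ≤ 0) →
    cs.foldl (pvStepA L) (acc, c) = (acc ++ cs, c + cs.length) := by
  intro cs
  induction cs with
  | nil => intro acc c _ _; simp
  | cons x rest ih =>
    intro acc c hc hbound
    have hb' : c + 1 + (rest.length : Int) < L ∨ L ≤ 0 := by
      rcases hbound with h | h
      · left; simp only [List.length_cons] at h; push_cast at h ⊢; omega
      · right; exact h
    have hne : ¬ (c + 1 = L) := by rcases hb' with h | h <;> omega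
    simp only [List.foldl_cons, pvStepA, hne, if_false]
    rw [ih (acc ++ [x]) (c + 1) (by omega) hb']
    simp only [List.append_assoc, List.singleton_append, List.length_cons, Prod.mk.injEq,
      true_and]
    push_cast; ring

-- consuming one full block of n chars resets the counter and appends the block plus <br>
lemma pvA_fullBlock (L : Int) (hL : 0 < L) : ∀ (n : Nat) (cs acc : List Char), 0 < n → (n : Int) ≤ L → n ≤ cs.length →
    cs.foldl (pvStepA L) (acc, L - n) =
      (cs.drop n).foldl (pvStepA L) (acc ++ cs.take n ++ ('<' :: 'b' :: 'r' :: '>' :: []), 0) := by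
  intro n
  induction n with
  | zero => intro cs acc h; omega
  | succ m ih =>
    intro cs acc _ hnL hlen
    cases cs with
    | nil => simp at hlen
    | cons x rest =>
      by_cases hm : m = 0
      · subst hm
        simp only [List.foldl_cons, pvStepA]
        have : L - 1 + 1 = L := by omega
        simp [this]
      · have hne : ¬ (L - (m + 1 : Nat) + 1 = L) := by push_cast; omega
        simp only [List.foldl_cons, pvStepA, hne, if_false]
        have harg : L - (m + 1 : Nat) + 1 = L - (m : Nat) := by push_cast; omega
        rw [harg, ih rest (acc ++ [x]) (by omega) (by push_cast at *; omega) (by simpa using hlen)]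
        simp

-- A's loop computes pvChunks
lemma pvA_chunks (L : Int) (hL : 0 < L) (cs : List Char) :
    ∀ acc, (cs.foldl (pvStepA L) (acc, 0)).1 = acc ++ pvChunks L.toNat cs := by
  induction hn : cs.length using Nat.strong_induction_on generalizing cs with
  | _ n ihn =>
  subst hn
  intro acc
  have hLn : L.toNat ≠ 0 := by omega
  by_cases hlt : cs.length < L.toNat
  · rw [pvA_noBreak L cs acc 0 le_rfl (Or.inl (by omega))]
    rw [pvChunks, dif_pos (Or.inr hlt)]
  · have h0 : L - (L.toNat : Nat) = (0 : Int) := by omega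
    have := pvA_fullBlock L hL L.toNat cs acc (by omega) (by omega) (by omega)
    rw [h0] at this
    rw [this]
    rw [ihn (cs.drop L.toNat).length (by rw [List.length_drop]; omega) (cs.drop L.toNat) rfl]
    conv_rhs => rw [pvChunks]
    rw [dif_neg (by push_neg; exact ⟨hLn, by omega⟩)]
    simp

-- B's join of fixed slices computes pvChunks (pure Nat form)
lemma pvB_chunks (Ln : Nat) (hLn : 0 < Ln) (cs : List Char) :
    (((List.range (cs.length / Ln)).map
        (fun i => (cs.drop (i * Ln)).take Ln ++ ('<' :: 'b' :: 'r' :: '>' :: []))).flatten)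
      ++ cs.drop (cs.length / Ln * Ln) = pvChunks Ln cs := by
  induction hn : cs.length using Nat.strong_induction_on generalizing cs with
  | _ n ihn =>
  subst hn
  by_cases hlt : cs.length < Ln
  · have hq : cs.length / Ln = 0 := Nat.div_eq_of_lt hlt
    rw [pvChunks, dif_pos (Or.inr hlt)]
    simp [hq]
  · push_neg at hlt
    have hrec : cs.length = (cs.length - Ln) + Ln := by omega
    have hq : cs.length / Ln = (cs.length - Ln) / Ln + 1 := by
      conv_lhs => rw [hrec]
      rw [Nat.add_div_right _ hLn]
    have hdlen : (cs.drop Ln).length = cs.length - Ln := by simp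
    rw [pvChunks, dif_neg (by push_neg; exact ⟨by omega, by omega⟩)]
    rw [hq, List.range_succ_eq_map]
    have hshift : ∀ i : Nat, cs.drop (Nat.succ i * Ln) = (cs.drop Ln).drop (i * Ln) := by
      intro i; rw [List.drop_drop, Nat.succ_mul]; congr 1; omega
    simp only [List.map_cons, List.map_map, List.flatten_cons, Nat.zero_mul, List.drop_zero]
    have hmaps : (List.range ((cs.length - Ln) / Ln)).map
        ((fun i => (cs.drop (i * Ln)).take Ln ++ ('<' :: 'b' :: 'r' :: '>' :: [])) ∘ Nat.succ)
        = (List.range (((cs.drop Ln).length) / Ln)).map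
          (fun i => ((cs.drop Ln).drop (i * Ln)).take Ln ++ ('<' :: 'b' :: 'r' :: '>' :: [])) := by
      rw [hdlen]
      exact List.map_congr_left (fun i _ => by simp [Function.comp, hshift i])
    have hlast : cs.drop (((cs.length - Ln) / Ln + 1) * Ln)
        = (cs.drop Ln).drop ((cs.drop Ln).length / Ln * Ln) := by
      rw [hdlen, List.drop_drop, Nat.add_mul, Nat.one_mul, Nat.add_comm]
    rw [hmaps, hlast]
    rw [← ihn (cs.drop Ln).length (by omega) (cs.drop Ln) rfl]
    simp [List.append_assoc]

-- ===== VERDICT (by name: the statement is the Claim_ definition above) =====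
theorem quebrar_texto_spec : Claim_equal_quebrar_texto := by
  intro texto limite _
  unfold Spec_quebrar_texto
  by_cases hcase : limite ≤ 0
  · have hA : quebrar_texto texto limite = texto := by
      unfold quebrar_texto
      show String.ofList (texto.toList.foldl (pvStepA limite) ([], 0)).1 = texto
      rw [pvA_noBreak limite texto.toList [] 0 le_rfl (Or.inr hcase)]
      simp [String.ofList]
    rw [hA]; unfold quebrar_texto_alt; rw [if_pos hcase]
  · push_neg at hcase
    have hnle : ¬ limite ≤ 0 := not_le.mpr hcase
    have hmulcast : ∀ k : Nat, (k : Int) * limite = ((k * limite.toNat : Nat) : Int) := by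
      intro k; push_cast [Int.toNat_of_nonneg hcase.le]; ring
    set cs := texto.toList with hcs
    have hnf : PySem.Int.floordiv (cs.length : Int) limite = ((cs.length / limite.toNat : Nat) : Int) := by
      conv_lhs => rw [show limite = ((limite.toNat : Nat) : Int) by omega]
      exact_mod_cast PySem.Int.floordiv_natCast cs.length limite.toNat
    have hsl : ∀ i : Nat, PySem.List.slice cs (some ((i : Int) * limite)) (some (((i : Int) + 1) * limite))
        = (cs.drop (i * limite.toNat)).take limite.toNat := by
      intro i
      have ht1 : ((i : Int) * limite).toNat = i * limite.toNat := by
        rw [hmulcast i]; exact Int.toNat_natCast _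
      have ht2 : (((i : Int) + 1) * limite).toNat = (i + 1) * limite.toNat := by
        rw [show ((i : Int) + 1) = ((i + 1 : Nat) : Int) by push_cast; ring, hmulcast (i + 1)]
        exact Int.toNat_natCast _
      rw [PySem.List.slice_toNat cs (mul_nonneg (Int.natCast_nonneg i) hcase.le)
        (mul_nonneg (by positivity) hcase.le), ht1, ht2]
      congr 1
      rw [Nat.add_mul, Nat.one_mul]; omega
    have hsl2 : PySem.List.slice cs (some (((cs.length / limite.toNat : Nat) : Int) * limite)) none
        = cs.drop (cs.length / limite.toNat * limite.toNat) := by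
      rw [PySem.List.slice_from]
      · congr 1
        rw [hmulcast _]; exact Int.toNat_natCast _
      · exact mul_nonneg (Int.natCast_nonneg _) hcase.le
    have hA : quebrar_texto texto limite = String.ofList (pvChunks limite.toNat cs) := by
      unfold quebrar_texto
      show String.ofList (cs.foldl (pvStepA limite) ([], 0)).1 = _
      rw [pvA_chunks limite hcase cs []]
      simp
    rw [hA]
    simp only [quebrar_texto_alt, if_neg hnle, ← hcs]
    rw [hnf, hsl2, PySem.List.pyRange_one]
    simp only [zero_add, List.map_map, Int.toNat_natCast, Int.sub_zero]
    have hmap : (List.range (cs.length / limite.toNat)).map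
        ((fun i => PySem.List.slice cs (some (i * limite)) (some ((i + 1) * limite))
          ++ ('<' :: 'b' :: 'r' :: '>' :: [])) ∘ (fun k : Nat => (k : Int)))
        = (List.range (cs.length / limite.toNat)).map
          (fun i => (cs.drop (i * limite.toNat)).take limite.toNat ++ ('<' :: 'b' :: 'r' :: '>' :: [])) :=
      List.map_congr_left (fun i _ => by simp only [Function.comp_apply]; rw [hsl i])
    rw [hmap, pvB_chunks limite.toNat (by omega) cs]
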